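-- pv_equiv track=rewrite | github.com/sevanboyajian/mlb_stats | batch/pipeline/score_game.py | signal_display_name
-- ===== SOURCE A (Python) =====
-- SIGNAL_DISPLAY_NAME: dict[str, str] = {
--     "S1H2": "Streak Fade",
--     "S1+H2": "Streak Fade",
--     "MV-F": "Wind Fade (ML)",
--     "MV-B": "Wind Boost (Over)",
--     "H3b": "Wind → Over",
--     "LHP_FADE": "LHP Mismatch",
--     "LHP_FADE_RL": "LHP RL Edge",
--     "S1": "Streak Pressure",
--     "NF4": "Pitching Edge",
--     "JulyOVER": "July over boost",
--     "S6": "Hot pitcher fade",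
-- }
--
-- def signal_display_name(signal_id: str) -> str:
--     """
--     Map internal ``signal_id`` (may be compound ``A+B``) to a short reader label.
--     Unknown ids fall back to the raw id (rare; helps catch new evaluators in dev).
--     """
--     raw = (signal_id or "").strip()
--     if not raw:
--         return ""
--     if "+" in raw:
--         parts = [p.strip() for p in raw.split("+") if p.strip()]
--         return " + ".join(signal_display_name(p) for p in parts)
--     return SIGNAL_DISPLAY_NAME.get(raw, raw)
-- ===== SOURCE B (Python) =====
-- SIGNAL_DISPLAY_NAME: dict[str, str] = {
--     "S1H2": "Streak Fade",
--     "S1+H2": "Streak Fade",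
--     "MV-F": "Wind Fade (ML)",
--     "MV-B": "Wind Boost (Over)",
--     "H3b": "Wind → Over",
--     "LHP_FADE": "LHP Mismatch",
--     "LHP_FADE_RL": "LHP RL Edge",
--     "S1": "Streak Pressure",
--     "NF4": "Pitching Edge",
--     "JulyOVER": "July over boost",
--     "S6": "Hot pitcher fade",
-- }
--
--
-- def signal_display_name(signal_id: str) -> str:
--     """Flat, non-recursive: split once, strip-and-filter, look each part up."""
--     raw = (signal_id or "").strip()
--     parts = [p.strip() for p in raw.split("+") if p.strip()]
--     return " + ".join(SIGNAL_DISPLAY_NAME.get(p, p) for p in parts)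
-- ===== Notes on version B (the rewrite author's own statement) =====
-- stated objective: simpler
-- what changed: Replaces A's recursion with its separate compound-id branch by a single flat split/strip/filter/lookup pipeline applied uniformly to every input.
import Mathlib
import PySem

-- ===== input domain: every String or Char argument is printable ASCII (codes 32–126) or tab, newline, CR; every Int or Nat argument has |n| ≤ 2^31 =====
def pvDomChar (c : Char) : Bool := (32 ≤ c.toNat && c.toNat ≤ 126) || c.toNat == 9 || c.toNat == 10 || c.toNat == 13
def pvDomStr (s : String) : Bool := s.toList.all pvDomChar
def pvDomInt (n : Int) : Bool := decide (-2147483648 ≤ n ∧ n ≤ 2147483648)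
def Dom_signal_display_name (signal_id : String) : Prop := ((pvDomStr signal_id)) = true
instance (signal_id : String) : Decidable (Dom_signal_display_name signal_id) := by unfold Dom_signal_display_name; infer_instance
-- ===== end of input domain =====

-- B replaces A's recursion and separate compound-id branch by one flat split/strip/filter/lookup pipeline (objective: simpler).

-- ===== PORT A =====
-- module-level constant, shared by both Pythons
def SIGNAL_DISPLAY_NAME : PySem.Dict String String := PySem.Dict.ofList [
  ("S1H2", "Streak Fade"), ("S1+H2", "Streak Fade"), ("MV-F", "Wind Fade (ML)"),
  ("MV-B", "Wind Boost (Over)"), ("H3b", "Wind → Over"), ("LHP_FADE", "LHP Mismatch"),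
  ("LHP_FADE_RL", "LHP RL Edge"), ("S1", "Streak Pressure"), ("NF4", "Pitching Edge"),
  ("JulyOVER", "July over boost"), ("S6", "Hot pitcher fade")]

-- A's recursion, totalised by fuel only (the fuel branch returning "" is never reached:
-- the recursion depth is ≤ 2 and the wrapper passes |signal_id| + 1).
-- '(signal_id or "")' is the identity on String and is ported as such;
-- '.getD []' only totalises split? (the separator "+" is non-empty, so split? is always 'some').
def signal_display_name_rec : Nat → String → String
  | 0, _ => ""
  | fuel + 1, signal_id =>
    let raw := PySem.Str.strip signal_id
    if raw = "" then ""
    else if PySem.Str.isIn "+" raw then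
      let parts := (((PySem.Str.split? raw "+").getD []).map PySem.Str.strip).filter (fun p => p ≠ "")
      PySem.Str.join " + " (parts.map (signal_display_name_rec fuel))
    else SIGNAL_DISPLAY_NAME.getD raw raw

def signal_display_name (signal_id : String) : String :=
  signal_display_name_rec (signal_id.toList.length + 1) signal_id

-- ===== PORT B =====
def signal_display_name_alt (signal_id : String) : String :=
  let raw := PySem.Str.strip signal_id
  let parts := (((PySem.Str.split? raw "+").getD []).map PySem.Str.strip).filter (fun p => p ≠ "")
  PySem.Str.join " + " (parts.map (fun p => SIGNAL_DISPLAY_NAME.getD p p))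

-- ===== PRECONDITION & SPEC =====
def Spec_signal_display_name (signal_id : String) (out : String) : Prop := out = signal_display_name_alt signal_id
instance (signal_id : String) (out : String) : Decidable (Spec_signal_display_name signal_id out) := by unfold Spec_signal_display_name; infer_instance

-- ===== CLAIM (what is proved, stated in full; the proofs are below) =====
def Claim_equal_signal_display_name : Prop := ∀ (signal_id : String), Dom_signal_display_name signal_id → Spec_signal_display_name signal_id (signal_display_name signal_id)

-- ===== LEMMAS AND PROOFS =====

-- clean structural model of Python's single-character split, used only in the proofs
def pvSplitC (c : Char) : List Char → List (List Char)
  | [] => [[]]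
  | x :: xs =>
    if x = c then [] :: pvSplitC c xs
    else match pvSplitC c xs with
      | [] => [[x]]
      | p :: ps => (x :: p) :: ps

lemma pvSplitC_ne_nil (c : Char) (l : List Char) : pvSplitC c l ≠ [] := by
  cases l with
  | nil => simp [pvSplitC]
  | cons x xs =>
    simp only [pvSplitC]
    split
    · simp
    · split <;> simp

lemma pvGo_eq (c : Char) : ∀ (fuel : Nat) (l cur : List Char) (acc : List (List Char)),
    l.length ≤ fuel →
    PySem.Chars.splitOn.go [c] fuel l cur acc
      = acc.reverse ++ (pvSplitC c l).modifyHead (fun p => cur.reverse ++ p) := by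
  intro fuel
  induction fuel with
  | zero =>
    intro l cur acc hl
    have : l = [] := List.length_eq_zero_iff.mp (Nat.le_zero.mp hl)
    subst this
    simp [PySem.Chars.splitOn.go, pvSplitC]
  | succ f ih =>
    intro l cur acc hl
    cases l with
    | nil => simp [PySem.Chars.splitOn.go, pvSplitC]
    | cons x xs =>
      by_cases hx : x = c
      · subst hx
        have hpre : [x].isPrefixOf (x :: xs) = true := by simp [List.isPrefixOf]
        rw [show PySem.Chars.splitOn.go [x] (f + 1) (x :: xs) cur acc
              = PySem.Chars.splitOn.go [x] f xs [] (cur.reverse :: acc) by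
            simp [PySem.Chars.splitOn.go, hpre]]
        rw [ih xs [] (cur.reverse :: acc) (by simpa using Nat.le_of_succ_le_succ hl)]
        cases hq : pvSplitC x xs with
        | nil => exact absurd hq (pvSplitC_ne_nil x xs)
        | cons q qs => simp [pvSplitC, hq, List.modifyHead]
      · have hpre : [c].isPrefixOf (x :: xs) = false := by
          simp [List.isPrefixOf]
          exact fun h => (hx h.symm).elim
        rw [show PySem.Chars.splitOn.go [c] (f + 1) (x :: xs) cur acc
              = PySem.Chars.splitOn.go [c] f xs (x :: cur) acc by
            simp [PySem.Chars.splitOn.go, hpre]]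
        rw [ih xs (x :: cur) acc (by simpa using Nat.le_of_succ_le_succ hl)]
        obtain ⟨p, ps, hps⟩ := List.exists_cons_of_ne_nil (pvSplitC_ne_nil c xs)
        simp [pvSplitC, hx, hps, List.modifyHead]

lemma pvSplitOn_singleton (c : Char) (l : List Char) :
    PySem.Chars.splitOn l [c] = pvSplitC c l := by
  unfold PySem.Chars.splitOn
  rw [pvGo_eq c (l.length + 1) l [] [] (by omega)]
  cases h : pvSplitC c l with
  | nil => exact absurd h (pvSplitC_ne_nil c l)
  | cons p ps => simp [List.modifyHead]

lemma pvSplitC_of_not_mem {c : Char} {l : List Char} (h : c ∉ l) : pvSplitC c l = [l] := by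
  induction l with
  | nil => rfl
  | cons x xs ih =>
    simp only [List.mem_cons, not_or] at h
    have hx : ¬ x = c := fun hx => h.1 hx.symm
    simp [pvSplitC, hx, ih h.2]

lemma pvSplitC_not_mem {c : Char} {l p : List Char} (hp : p ∈ pvSplitC c l) : c ∉ p := by
  induction l generalizing p with
  | nil =>
    simp only [pvSplitC, List.mem_singleton] at hp
    subst hp; simp
  | cons x xs ih =>
    simp only [pvSplitC] at hp
    by_cases hx : x = c
    · rw [if_pos hx] at hp
      rcases List.mem_cons.mp hp with h | h
      · subst h; simp
      · exact ih h
    · rw [if_neg hx] at hp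
      rcases hq : pvSplitC c xs with _ | ⟨q, qs⟩
      · exact absurd hq (pvSplitC_ne_nil c xs)
      · rw [hq] at hp
        rcases List.mem_cons.mp hp with h | h
        · subst h
          have hq' : c ∉ q := ih (by rw [hq]; simp)
          intro hmem
          rcases List.mem_cons.mp hmem with h1 | h1
          · exact hx h1.symm
          · exact hq' h1
        · exact ih (by rw [hq]; exact List.mem_cons_of_mem _ h)

lemma pvMem_strip {a : Char} {l : List Char} (h : a ∈ PySem.Chars.strip l) : a ∈ l := by
  simp only [PySem.Chars.strip, PySem.Chars.rstrip, PySem.Chars.lstrip] at h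
  rw [List.mem_reverse] at h
  have h1 := (List.dropWhile_sublist _).mem h
  rw [List.mem_reverse] at h1
  exact (List.dropWhile_sublist _).mem h1

lemma pvRstrip_prefix (l : List Char) : PySem.Chars.rstrip l <+: l := by
  simp only [PySem.Chars.rstrip]
  rw [← List.reverse_suffix]
  simpa using List.dropWhile_suffix (l := l.reverse) (p := PySem.Chars.isspace)

lemma pvLstrip_rstrip (m : List Char)
    (hlm : List.dropWhile PySem.Chars.isspace m = m) :
    PySem.Chars.lstrip (PySem.Chars.rstrip m) = PySem.Chars.rstrip m := by
  rcases hr : PySem.Chars.rstrip m with _ | ⟨a, as⟩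
  · rfl
  · obtain ⟨t, ht⟩ := pvRstrip_prefix m
    rw [hr] at ht
    subst ht
    have ha : PySem.Chars.isspace a = false := by
      by_contra hsp
      rw [Bool.not_eq_false] at hsp
      rw [List.cons_append, List.dropWhile_cons, if_pos hsp] at hlm
      have := (List.dropWhile_sublist (l := as ++ t) (p := PySem.Chars.isspace)).length_le
      rw [hlm] at this
      simp at this
    simp [PySem.Chars.lstrip, ha]

lemma pvStrip_idem (l : List Char) :
    PySem.Chars.strip (PySem.Chars.strip l) = PySem.Chars.strip l := by
  show PySem.Chars.rstrip (PySem.Chars.lstrip (PySem.Chars.rstrip (PySem.Chars.lstrip l)))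
      = PySem.Chars.rstrip (PySem.Chars.lstrip l)
  rw [pvLstrip_rstrip (PySem.Chars.lstrip l)
      (by simp [PySem.Chars.lstrip, List.dropWhile_idempotent])]
  simp [PySem.Chars.rstrip, List.reverse_reverse, List.dropWhile_idempotent]

lemma pvStr_strip_strip (s : String) :
    PySem.Str.strip (PySem.Str.strip s) = PySem.Str.strip s := by
  apply String.toList_inj.mp
  simp [pvStrip_idem]

-- the shared 'parts' pipeline of both ports, factored for the proofs
def pvParts (raw : String) : List String :=
  (((PySem.Str.split? raw "+").getD []).map PySem.Str.strip).filter (fun p => p ≠ "")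

lemma pvSplit_plus (raw : String) :
    (PySem.Str.split? raw "+").getD []
      = (pvSplitC '+' raw.toList).map String.ofList := by
  simp [PySem.Str.split?, PySem.Chars.split?, pvSplitOn_singleton]

lemma pvMem_pvParts {raw p : String} (hp : p ∈ pvParts raw) :
    p ≠ "" ∧ PySem.Str.strip p = p ∧ PySem.Str.isIn "+" p = false := by
  unfold pvParts at hp
  rw [pvSplit_plus] at hp
  simp only [List.filter_map, List.mem_map, List.mem_filter, List.map_map] at hp
  obtain ⟨piece, ⟨hpiece, hne⟩, rfl⟩ := by
    simpa [List.mem_filter, List.mem_map, Function.comp] using hp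
  have hplus : '+' ∉ piece := pvSplitC_not_mem hpiece
  have htl : (PySem.Str.strip (String.ofList piece)).toList = PySem.Chars.strip piece := by
    simp
  refine ⟨hne, ?_, ?_⟩
  · apply String.toList_inj.mp
    rw [PySem.Str.toList_strip, htl, pvStrip_idem]
  · have : '+' ∉ (PySem.Str.strip (String.ofList piece)).toList := by
      rw [htl]; exact fun h => hplus (pvMem_strip h)
    have hinf : ¬ ([' '].tail ++ ['+'] <:+: (PySem.Str.strip (String.ofList piece)).toList) := by
      simpa [List.singleton_infix_iff] using this
    simp only [PySem.Str.isIn_eq]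
    rw [PySem.Chars.isIn_eq_false_iff]
    simpa using hinf

lemma pvParts_no_plus {raw : String} (hstrip : PySem.Str.strip raw = raw)
    (hraw : raw ≠ "") (h : PySem.Str.isIn "+" raw = false) : pvParts raw = [raw] := by
  have hplus : '+' ∉ raw.toList := by
    simp only [PySem.Str.isIn_eq] at h
    rw [PySem.Chars.isIn_eq_false_iff] at h
    intro hmem
    exact h (by simpa [List.singleton_infix_iff] using hmem)
  unfold pvParts
  rw [pvSplit_plus, pvSplitC_of_not_mem hplus]
  simp [String.ofList_toList, hstrip, hraw]

lemma pvJoin_singleton (sep x : String) : PySem.Str.join sep [x] = x := by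
  apply String.toList_inj.mp
  simp [PySem.Chars.join_singleton]

lemma pvAlt_eq (s : String) :
    signal_display_name_alt s
      = PySem.Str.join " + "
          ((pvParts (PySem.Str.strip s)).map (fun p => SIGNAL_DISPLAY_NAME.getD p p)) := rfl

lemma pvRec_succ (fuel : Nat) (s : String) :
    signal_display_name_rec (fuel + 1) s =
      if PySem.Str.strip s = "" then ""
      else if PySem.Str.isIn "+" (PySem.Str.strip s) then
        PySem.Str.join " + " ((pvParts (PySem.Str.strip s)).map (signal_display_name_rec fuel))
      else SIGNAL_DISPLAY_NAME.getD (PySem.Str.strip s) (PySem.Str.strip s) := rfl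

lemma pvRec_flat (fuel : Nat) (s : String) (hstrip : PySem.Str.strip s = s)
    (hne : s ≠ "") (hplus : PySem.Str.isIn "+" s = false) :
    signal_display_name_rec (fuel + 1) s = SIGNAL_DISPLAY_NAME.getD s s := by
  rw [pvRec_succ, hstrip, if_neg hne, if_neg (by simpa using hplus)]

set_option maxHeartbeats 1000000 in
lemma pvRec_eq_alt (fuel : Nat) (s : String) (hf : 2 ≤ fuel) :
    signal_display_name_rec fuel s = signal_display_name_alt s := by
  obtain ⟨g, rfl⟩ : ∃ g, fuel = g + 2 := ⟨fuel - 2, by omega⟩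
  rw [show g + 2 = (g + 1) + 1 from rfl, pvRec_succ, pvAlt_eq]
  by_cases hraw : PySem.Str.strip s = ""
  · rw [if_pos hraw, hraw]
    rfl
  · rw [if_neg hraw]
    by_cases hplus : PySem.Str.isIn "+" (PySem.Str.strip s) = true
    · rw [if_pos hplus]
      have hmap : (pvParts (PySem.Str.strip s)).map (signal_display_name_rec (g + 1))
          = (pvParts (PySem.Str.strip s)).map (fun p => SIGNAL_DISPLAY_NAME.getD p p) :=
        List.map_congr_left (fun p hp => by
          obtain ⟨hne, hstrip, hnop⟩ := pvMem_pvParts hp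
          exact pvRec_flat g p hstrip hne hnop)
      rw [hmap]
    · have hplus' : PySem.Str.isIn "+" (PySem.Str.strip s) = false := by simpa using hplus
      rw [if_neg hplus]
      rw [pvParts_no_plus (pvStr_strip_strip s) hraw hplus']
      simp [pvJoin_singleton]

-- ===== VERDICT (by name: the statement is the Claim_ definition above) =====
theorem signal_display_name_spec : Claim_equal_signal_display_name := by
  intro s _
  unfold Spec_signal_display_name signal_display_name
  by_cases h : s.toList.length = 0
  · have hs : s = "" := String.toList_inj.mp (by simpa using List.length_eq_zero_iff.mp h)
    subst hs
    rfl
  · exact pvRec_eq_alt (s.toList.length + 1) s (by omega)
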